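-- pv_equiv track=rewrite | github.com/hed-standard/hed-python | hed/schema/hed_schema_section.py | _get_tag_forms
-- ===== SOURCE A (Python) =====
-- def _get_tag_forms(name):
--     name_key = name
--     tag_forms = []
--     while name_key:
--         tag_forms.append(name_key)
--         slash_index = name_key.find("/")
--         if slash_index == -1:
--             break
--         else:
--             name_key = name_key[slash_index + 1:]
--
--     # We can't add value tags by themselves
--     if tag_forms[-1] == "#":
--         tag_forms = tag_forms[:-1]
--
--     return name_key, tag_forms
-- ===== SOURCE B (Python) =====
-- def _get_tag_forms(name):
--     # One right-to-left pass: build each suffix form as the characters are consed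
--     # on, recording the suffix after each slash, instead of repeated find/slice.
--     cur = ""
--     rev_forms = []
--     name_key = None
--     for ch in reversed(name):
--         if ch == "/":
--             if name_key is None:
--                 name_key = cur
--             if cur:
--                 rev_forms.append(cur)
--         cur = ch + cur
--     if name_key is None:
--         name_key = cur
--     if cur:
--         rev_forms.append(cur)
--     tag_forms = rev_forms[::-1]
--
--     # We can't add value tags by themselves
--     if tag_forms[-1] == "#":
--         tag_forms = tag_forms[:-1]
--
--     return name_key, tag_forms
-- ===== Notes on version B (the rewrite author's own statement) =====
-- stated objective: alternative
-- what changed: Replaces A's while-loop of repeated find-and-slice on shrinking suffixes by a single right-to-left character pass that builds the current suffix incrementally, recording each slash-delimited suffix form (and the name key) as the slashes are encountered.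
import Mathlib
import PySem

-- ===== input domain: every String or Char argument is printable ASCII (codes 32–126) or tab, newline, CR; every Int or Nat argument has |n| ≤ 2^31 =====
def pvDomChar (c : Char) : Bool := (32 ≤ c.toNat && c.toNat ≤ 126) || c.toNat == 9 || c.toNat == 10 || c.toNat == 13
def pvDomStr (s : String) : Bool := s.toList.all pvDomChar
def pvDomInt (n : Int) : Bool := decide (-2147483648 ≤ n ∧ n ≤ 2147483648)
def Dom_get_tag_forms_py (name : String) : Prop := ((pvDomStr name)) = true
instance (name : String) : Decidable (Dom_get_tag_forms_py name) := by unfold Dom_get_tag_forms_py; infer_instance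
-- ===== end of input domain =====

-- B replaces A's repeated find/slice loop by a single right-to-left pass that
-- conses each suffix form while recording the suffix after every slash (alternative decomposition).

-- ===== PORT A =====
-- the 'while name_key:' loop of A: append the current suffix, find the first slash, continue after it
def aLoop (name_key : List Char) (tag_forms : List (List Char)) : List Char × List (List Char) :=
  if _h : name_key = [] then (name_key, tag_forms)
  else
    let tag_forms2 := tag_forms ++ [name_key]
    let slash_index := PySem.Chars.find name_key ['/']
    if _h2 : slash_index = -1 then (name_key, tag_forms2)
    else aLoop (PySem.List.slice name_key (some (slash_index + 1)) none) tag_forms2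
termination_by name_key.length
decreasing_by
  have h0 : 0 ≤ PySem.Chars.find name_key ['/'] := by
    have := PySem.Chars.neg_one_le_find name_key ['/']
    omega
  rw [PySem.List.slice_from _ (by omega)]
  have h1 : 1 ≤ (PySem.Chars.find name_key ['/'] + 1).toNat := by omega
  have h2 : 0 < name_key.length := List.length_pos_iff.mpr _h
  simp only [List.length_drop]
  omega

def get_tag_forms_py (name : String) : String × List String :=
  let r := aLoop name.toList []
  let tag_forms :=
    match PySem.List.pyGet? r.2 (-1) with                      -- tag_forms[-1]
    | some last => if last = ['#'] then PySem.List.slice r.2 none (some (-1)) else r.2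
    | none => r.2   -- Python raises IndexError here (only for name = ""); excluded by Pre_
  (String.ofList r.1, tag_forms.map String.ofList)

-- ===== PORT B =====
-- loop body of Source B's 'for ch in reversed(name)': state (cur, rev_forms, name_key)
def bStep (st : List Char × List (List Char) × Option (List Char)) (ch : Char) :
    List Char × List (List Char) × Option (List Char) :=
  match st with
  | (cur, rev_forms, name_key) =>
    if ch = '/' then
      let name_key := match name_key with | none => some cur | some k => some k
      let rev_forms := if cur ≠ [] then rev_forms ++ [cur] else rev_forms
      (ch :: cur, rev_forms, name_key)
    else
      (ch :: cur, rev_forms, name_key)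

def get_tag_forms_py_alt (name : String) : String × List String :=
  match name.toList.reverse.foldl bStep ([], [], none) with
  | (cur, rev_forms, name_key) =>
    let name_key := match name_key with | none => cur | some k => k
    let rev_forms := if cur ≠ [] then rev_forms ++ [cur] else rev_forms
    let tag_forms := rev_forms.reverse     -- rev_forms[::-1] (PySem.List.slice?_none_none_neg_one)
    let tag_forms :=
      match PySem.List.pyGet? tag_forms (-1) with              -- tag_forms[-1]
      | some last => if last = ['#'] then PySem.List.slice tag_forms none (some (-1)) else tag_forms
      | none => tag_forms   -- Python raises IndexError here (only for name = ""); excluded by Pre_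
    (String.ofList name_key, tag_forms.map String.ofList)

-- ===== PRECONDITION & SPEC =====
-- Pre_ excludes only name = "", on which the Python A (and B) raise IndexError at tag_forms[-1].
def Pre_get_tag_forms_py (name : String) : Prop := name ≠ ""
instance (name : String) : Decidable (Pre_get_tag_forms_py name) := by unfold Pre_get_tag_forms_py; infer_instance
def pvWitness_get_tag_forms_py : String := "a/#"

def Spec_get_tag_forms_py (name : String) (out : String × List String) : Prop := out = get_tag_forms_py_alt name
instance (name : String) (out : String × List String) : Decidable (Spec_get_tag_forms_py name out) := by unfold Spec_get_tag_forms_py; infer_instance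

-- ===== CLAIM (what is proved, stated in full; the proofs are below) =====
def Claim_equal_get_tag_forms_py : Prop := ∀ (name : String), Dom_get_tag_forms_py name → Pre_get_tag_forms_py name → Spec_get_tag_forms_py name (get_tag_forms_py name)

-- ===== LEMMAS AND PROOFS =====

-- B's fold step, in foldr orientation
def bG (ch : Char) (st : List Char × List (List Char) × Option (List Char)) :
    List Char × List (List Char) × Option (List Char) := bStep st ch

lemma aLoop_nil (acc : List (List Char)) : aLoop [] acc = ([], acc) := by
  rw [aLoop.eq_def]; simp

lemma aLoop_acc_aux (n : Nat) : ∀ (s : List Char) (acc : List (List Char)), s.length ≤ n →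
    aLoop s acc = ((aLoop s []).1, acc ++ (aLoop s []).2) := by
  induction n with
  | zero =>
    intro s acc h
    have hs : s = [] := by
      cases s with
      | nil => rfl
      | cons a t => simp at h
    subst hs
    simp [aLoop_nil]
  | succ n ih =>
    intro s acc h
    by_cases hs : s = []
    · subst hs; simp [aLoop_nil]
    · rw [aLoop.eq_def, aLoop.eq_def (name_key := s)]
      simp only [hs, dite_false]
      by_cases hf : PySem.Chars.find s ['/'] = -1
      · simp [hf]
      · simp only [hf, dite_false]
        have h0 : 0 ≤ PySem.Chars.find s ['/'] := by
          have := PySem.Chars.neg_one_le_find s ['/']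
          omega
        rw [PySem.List.slice_from _ (by omega)]
        have hlen : (s.drop (PySem.Chars.find s ['/'] + 1).toNat).length ≤ n := by
          have h1 : 1 ≤ (PySem.Chars.find s ['/'] + 1).toNat := by omega
          have h2 : 0 < s.length := List.length_pos_iff.mpr hs
          simp only [List.length_drop]
          omega
        simp only [List.nil_append]
        rw [ih _ (acc ++ [s]) hlen, ih _ [s] hlen]
        simp

lemma aLoop_acc (s : List Char) (acc : List (List Char)) :
    aLoop s acc = ((aLoop s []).1, acc ++ (aLoop s []).2) :=
  aLoop_acc_aux s.length s acc le_rfl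

lemma infix_singleton_iff_mem (c : Char) (s : List Char) : [c] <:+: s ↔ c ∈ s := by
  constructor
  · intro h
    exact h.mem (by simp)
  · intro h
    obtain ⟨i, hi, hc⟩ := List.getElem_of_mem h
    have hilen : i < s.length := hi
    refine ⟨s.take i, s.drop (i + 1), ?_⟩
    rw [← hc, List.append_assoc, List.singleton_append, ← List.drop_eq_getElem_cons hilen]
    exact List.take_append_drop i s

lemma aLoop_noslash (s : List Char) (h : ('/' : Char) ∉ s) :
    aLoop s [] = (s, if s = [] then [] else [s]) := by
  by_cases hs : s = []
  · subst hs; simp [aLoop_nil]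
  · have hf : PySem.Chars.find s ['/'] = -1 := by
      rw [PySem.Chars.find_eq_neg_one_iff]
      rw [infix_singleton_iff_mem]
      exact h
    rw [aLoop.eq_def]
    simp [hs, hf]

lemma aLoop_forms_head (s : List Char) (hs : s ≠ []) :
    (aLoop s []).2 = s :: ((aLoop s []).2.drop 1) := by
  rw [aLoop.eq_def]
  simp only [hs, dite_false]
  by_cases hf : PySem.Chars.find s ['/'] = -1
  · simp [hf]
  · simp only [hf, dite_false]
    rw [aLoop_acc]
    simp

lemma bG_noslash (p : List Char) (h : ('/' : Char) ∉ p) :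
    ∀ st : List Char × List (List Char) × Option (List Char),
      p.foldr bG st = (p ++ st.1, st.2.1, st.2.2) := by
  induction p with
  | nil => intro st; rfl
  | cons c t ih =>
    intro st
    have hc : c ≠ '/' := by
      intro hcc; exact h (hcc ▸ List.mem_cons_self)
    have ht : ('/' : Char) ∉ t := fun hm => h (List.mem_cons_of_mem _ hm)
    simp only [List.foldr_cons, ih ht st, bG, bStep, hc, ite_false]
    simp

-- the decomposition of s at its first '/'
lemma find_decomp (s : List Char) (hmem : ('/' : Char) ∈ s) :
    0 ≤ PySem.Chars.find s ['/'] ∧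
    ('/' : Char) ∉ s.take (PySem.Chars.find s ['/']).toNat ∧
    s = s.take (PySem.Chars.find s ['/']).toNat ++
        '/' :: s.drop ((PySem.Chars.find s ['/']).toNat + 1) := by
  have h0 : 0 ≤ PySem.Chars.find s ['/'] := by
    rw [PySem.Chars.find_nonneg_iff, infix_singleton_iff_mem]; exact hmem
  obtain ⟨hpre, hmin⟩ := PySem.Chars.find_spec (s := s) (sub := ['/']) h0
  set k := (PySem.Chars.find s ['/']).toNat with hk
  obtain ⟨r, hr⟩ := hpre
  have hdropk : s.drop k = '/' :: r := by
    cases hdk : s.drop k with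
    | nil => rw [hdk] at hr; simp at hr
    | cons a u =>
      rw [hdk] at hr
      simp at hr
      obtain ⟨ha, hu⟩ := hr
      rw [ha, hu]
  have hkr : r = s.drop (k + 1) := by
    have := congrArg List.tail hdropk
    simpa [List.tail_drop] using this.symm
  refine ⟨h0, ?_, ?_⟩
  · intro hmemtake
    obtain ⟨i, hi, hc⟩ := List.getElem_of_mem hmemtake
    have hik : i < k := by
      have := hi
      simp only [List.length_take] at this
      omega
    have hilen : i < s.length := by
      have := hi
      simp only [List.length_take] at this
      omega
    have hsi : s[i] = '/' := by
      have := hc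
      rwa [List.getElem_take] at this
    refine hmin i hik ⟨s.drop (i + 1), ?_⟩
    rw [List.singleton_append, ← hsi, ← List.drop_eq_getElem_cons hilen]
  · conv_lhs => rw [← List.take_append_drop k s]
    rw [hdropk, hkr]

-- main invariant: B's right-to-left fold, expressed through A's loop
lemma main_aux (n : Nat) : ∀ s : List Char, s.length ≤ n →
    s.foldr bG ([], [], none) =
      (s, ((aLoop s []).2.drop 1).reverse,
        if ('/' : Char) ∈ s then some (aLoop s []).1 else none) := by
  induction n with
  | zero =>
    intro s h
    have hs : s = [] := by
      cases s with
      | nil => rfl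
      | cons a t => simp at h
    subst hs
    simp [aLoop_nil]
  | succ n ih =>
    intro s hlen
    by_cases hmem : ('/' : Char) ∈ s
    · obtain ⟨h0, hnp, hdecomp⟩ := find_decomp s hmem
      set k := (PySem.Chars.find s ['/']).toNat with hk
      set t := s.drop (k + 1) with ht
      have hklen : k < s.length := by
        have := congrArg List.length hdecomp
        simp only [List.length_append, List.length_cons, List.length_take] at this
        omega
      have htlen : t.length ≤ n := by
        rw [ht]
        simp only [List.length_drop]
        omega
      have iht := ih t htlen
      -- LHS
      conv_lhs => rw [hdecomp]
      rw [List.foldr_append]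
      simp only [List.foldr_cons]
      rw [iht]
      -- the slash-free prefix just conses itself onto the state
      rw [bG_noslash _ hnp]
      -- RHS: unfold A once
      have hsne : s ≠ [] := by intro h; rw [h] at hmem; exact (List.not_mem_nil) hmem
      have hfne : PySem.Chars.find s ['/'] ≠ -1 := by omega
      have hA : aLoop s [] = ((aLoop t []).1, s :: (aLoop t []).2) := by
        rw [aLoop.eq_def]
        simp only [hsne, dite_false, hfne]
        rw [PySem.List.slice_from _ (by omega)]
        have : (PySem.Chars.find s ['/'] + 1).toNat = k + 1 := by omega
        rw [this, ← ht, aLoop_acc]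
        simp
      rw [hA]
      simp only [hmem, if_true]
      -- now split on whether t is empty / has a slash to evaluate bG '/'
      have hfirst : s.take k ++ '/' :: t = s := hdecomp.symm
      by_cases htnil : t = []
      · conv_rhs => rw [hdecomp]
        simp only [htnil] at iht ⊢
        simp [bG, bStep, aLoop_nil]
      · have hhead : (aLoop t []).2 = t :: ((aLoop t []).2.drop 1) := aLoop_forms_head t htnil
        simp only [Prod.mk.injEq]
        by_cases htmem : ('/' : Char) ∈ t
        · simp only [htmem, bG, bStep, htnil, ne_eq, not_false_iff, if_pos]
          refine ⟨hfirst, ?_, trivial⟩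
          conv_rhs => rw [hhead]
          simp
        · have hT := aLoop_noslash t htmem
          simp only [htmem, if_false, bG, bStep, htnil, ne_eq, not_false_iff, if_pos]
          refine ⟨hfirst, ?_, ?_⟩
          · conv_rhs => rw [hhead]
            simp
          · rw [hT]
    · rw [bG_noslash s hmem]
      rw [aLoop_noslash s hmem]
      by_cases hs : s = [] <;> simp [hs, hmem]

lemma main_inv (s : List Char) :
    s.foldr bG ([], [], none) =
      (s, ((aLoop s []).2.drop 1).reverse,
        if ('/' : Char) ∈ s then some (aLoop s []).1 else none) :=
  main_aux s.length s le_rfl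

-- ===== VERDICT (by name: the statement is the Claim_ definition above) =====
theorem get_tag_forms_py_spec : Claim_equal_get_tag_forms_py := by
  intro name _hdom hpre
  unfold Spec_get_tag_forms_py
  unfold get_tag_forms_py get_tag_forms_py_alt
  have hfold : name.toList.reverse.foldl bStep ([], [], none) = name.toList.foldr bG ([], [], none) := by
    rw [List.foldl_reverse]
    rfl
  rw [hfold, main_inv]
  set s := name.toList with hsdef
  have hsne : s ≠ [] := by
    intro h
    apply hpre
    simpa [hsdef] using congrArg String.ofList h
  -- show B's pre-trim pair equals A's
  have hkey : (match (if ('/' : Char) ∈ s then some (aLoop s []).1 else none) with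
      | none => s | some k => k) = (aLoop s []).1 := by
    by_cases hmem : ('/' : Char) ∈ s
    · simp [hmem]
    · simp [hmem, (aLoop_noslash s hmem), hsne]
  have hforms : (if s ≠ [] then ((aLoop s []).2.drop 1).reverse ++ [s]
        else ((aLoop s []).2.drop 1).reverse).reverse = (aLoop s []).2 := by
    simp only [hsne, ne_eq, not_false_iff, if_pos]
    conv_rhs => rw [aLoop_forms_head s hsne]
    rw [List.reverse_append]
    simp [List.drop_one]
  simp only [hkey, hforms]
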